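-- pv_equiv track=rewrite | github.com/AlexanderHott/python-utils | prepend.py | split_buffer
-- ===== SOURCE A (Python) =====
-- COMMENT = "#"
--
-- def split_buffer(buffer: list[str]) -> tuple[list[str], list[str]]:
--     """Returns a tuple with the header section and the rest of the buffer."""
--     comment_section = []
--     code_section = []
--
--     for i, line in enumerate(buffer):
--         if not line.startswith(COMMENT):
--             code_section = buffer[i:]
--             break
--         comment_section.append(line)
--
--     return comment_section, code_section
-- ===== SOURCE B (Python) =====
-- COMMENT = "#"
--
-- def split_buffer(buffer: list[str]) -> tuple[list[str], list[str]]: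
--     """Returns a tuple with the header section and the rest of the buffer."""
--     if not buffer or not buffer[0].startswith(COMMENT):
--         return [], buffer
--     comment_rest, code_section = split_buffer(buffer[1:])
--     return [buffer[0]] + comment_rest, code_section
-- ===== Notes on version B (the rewrite author's own statement) =====
-- stated objective: alternative
-- what changed: B is recursive on the list structure: it splits the tail and prepends the head comment line, instead of A's iterative enumerate-loop with an accumulator, early break and a tail slice.
import Mathlib
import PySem

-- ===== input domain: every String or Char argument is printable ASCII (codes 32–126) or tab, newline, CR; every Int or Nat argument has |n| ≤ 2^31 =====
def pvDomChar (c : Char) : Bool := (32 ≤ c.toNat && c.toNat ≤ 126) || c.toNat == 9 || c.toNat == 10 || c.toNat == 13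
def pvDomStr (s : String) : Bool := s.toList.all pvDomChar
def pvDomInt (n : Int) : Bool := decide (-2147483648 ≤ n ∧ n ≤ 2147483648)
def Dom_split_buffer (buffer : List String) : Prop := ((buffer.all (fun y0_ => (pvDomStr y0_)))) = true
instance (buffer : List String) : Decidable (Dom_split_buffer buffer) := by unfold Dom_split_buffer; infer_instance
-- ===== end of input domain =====

-- B is a structural recursion (split the tail, prepend the head comment line) instead of A's iterative loop; same O(n) cost.


-- ===== PORT A =====
-- the for-loop over enumerate(buffer) with its early break and accumulator
def split_buffer_loop (buffer : List String) : List (Int × String) → List String → List String × List String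
  | [], cs => (cs, [])
  | (i, line) :: rest, cs =>
    if ¬ PySem.Str.startswith line "#" then (cs, PySem.List.slice buffer (some i) none)
    else split_buffer_loop buffer rest (cs ++ [line])

def split_buffer (buffer : List String) : List String × List String :=
  split_buffer_loop buffer (PySem.List.enumerate buffer 0) []

-- ===== PORT B =====
-- B's recursion: empty or non-comment head -> ([], buffer); else split the tail and cons the head
def split_buffer_alt : List String → List String × List String
  | [] => ([], [])
  | line :: rest =>
    if ¬ PySem.Str.startswith line "#" then ([], line :: rest)
    else
      let p := split_buffer_alt rest
      (line :: p.1, p.2)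

-- ===== PRECONDITION & SPEC =====
def Spec_split_buffer (buffer : List String) (out : List String × List String) : Prop := out = split_buffer_alt buffer
instance (buffer : List String) (out : List String × List String) : Decidable (Spec_split_buffer buffer out) := by unfold Spec_split_buffer; infer_instance

-- ===== CLAIM (what is proved, stated in full; the proofs are below) =====
def Claim_equal_split_buffer : Prop := ∀ (buffer : List String), Dom_split_buffer buffer → Spec_split_buffer buffer (split_buffer buffer)

-- ===== LEMMAS AND PROOFS =====

lemma split_buffer_loop_eq (buffer : List String) :
    ∀ (suf : List String) (s : Nat) (cs : List String),
      buffer.drop s = suf →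
      split_buffer_loop buffer (PySem.List.enumerate suf (s : Int)) cs =
        (cs ++ suf.takeWhile (fun l => PySem.Str.startswith l "#"),
         suf.dropWhile (fun l => PySem.Str.startswith l "#")) := by
  intro suf
  induction suf with
  | nil => intro s cs _; simp [PySem.List.enumerate, split_buffer_loop]
  | cons line rest ih =>
    intro s cs hdrop
    rw [PySem.List.enumerate_cons]
    by_cases h : PySem.Chars.startswith line.toList ['#']
    · have hstep : buffer.drop (s + 1) = rest := by
        have h1 : (buffer.drop s).drop 1 = rest := by rw [hdrop]; rfl
        simpa [List.drop_drop, Nat.add_comm] using h1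
      have hc : ((s : Int) + 1) = ((s + 1 : Nat) : Int) := by push_cast; ring
      rw [split_buffer_loop, if_neg (by simp [h]), hc, ih (s + 1) (cs ++ [line]) hstep]
      simp [h]
    · rw [split_buffer_loop, if_pos (by simp [h]), PySem.List.slice_from_natCast, hdrop]
      simp [h]

lemma alt_eq_takeWhile : ∀ (buffer : List String),
    split_buffer_alt buffer =
      (buffer.takeWhile (fun l => PySem.Str.startswith l "#"),
       buffer.dropWhile (fun l => PySem.Str.startswith l "#")) := by
  intro buffer
  induction buffer with
  | nil => rfl
  | cons line rest ih =>
    by_cases h : PySem.Chars.startswith line.toList ['#']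
    · rw [split_buffer_alt, if_neg (by simp [PySem.Str.startswith, h]), ih]
      simp [PySem.Str.startswith, h]
    · rw [split_buffer_alt, if_pos (by simp [PySem.Str.startswith, h])]
      simp [List.takeWhile_cons, List.dropWhile_cons, PySem.Str.startswith, h]

-- ===== VERDICT (by name: the statement is the Claim_ definition above) =====
theorem split_buffer_spec : Claim_equal_split_buffer := by
  intro buffer _
  unfold Spec_split_buffer split_buffer
  rw [show (0 : Int) = ((0 : Nat) : Int) from rfl,
    split_buffer_loop_eq buffer buffer 0 [] (by simp), alt_eq_takeWhile]
  simp
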